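-- pv_equiv track=rewrite | github.com/ImpulsVL/lection_work | main.py | count_and_sum
-- ===== SOURCE A (Python) =====
-- def count_and_sum(numbers):
--     if not numbers:
--         return 0, 0
--
--     count = 0
--     sum = 0
--
--     for num in numbers:
--         if num > 0 and num % 2 == 0:
--             count += 1
--             sum += num
--
--     return count, sum
-- ===== SOURCE B (Python) =====
-- def count_and_sum(numbers):
--     # Divide-and-conquer: recursively split the index range in half and
--     # combine (count, sum) results of the two halves.
--     def solve(lo, hi):
--         if hi - lo == 0:
--             return 0, 0
--         if hi - lo == 1:
--             n = numbers[lo]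
--             if n > 0 and n % 2 == 0:
--                 return 1, n
--             return 0, 0
--         mid = (lo + hi) // 2
--         c1, s1 = solve(lo, mid)
--         c2, s2 = solve(mid, hi)
--         return c1 + c2, s1 + s2
--     return solve(0, len(numbers))
-- ===== Notes on version B (the rewrite author's own statement) =====
-- stated objective: alternative
-- what changed: Replaces A's single fused accumulation loop with a divide-and-conquer recursion over index ranges that splits the list in half and combines (count,sum) pairs of the halves.
import Mathlib
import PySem

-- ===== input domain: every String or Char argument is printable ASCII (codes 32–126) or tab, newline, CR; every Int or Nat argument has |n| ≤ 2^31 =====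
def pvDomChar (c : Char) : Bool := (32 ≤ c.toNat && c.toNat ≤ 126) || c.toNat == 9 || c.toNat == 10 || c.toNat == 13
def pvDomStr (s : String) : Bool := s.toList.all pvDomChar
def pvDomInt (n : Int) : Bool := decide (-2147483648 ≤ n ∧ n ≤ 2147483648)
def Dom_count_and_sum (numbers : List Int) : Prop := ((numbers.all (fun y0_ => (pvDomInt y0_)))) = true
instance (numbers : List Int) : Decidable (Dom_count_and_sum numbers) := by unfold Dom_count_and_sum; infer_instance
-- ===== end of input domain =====

-- B replaces A's fused accumulation loop with divide-and-conquer over index ranges (alternative decomposition, same cost).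

-- ===== PORT A =====
-- fused loop: fold carrying (count, sum); empty-input guard kept as in A
def count_and_sum (numbers : List Int) : Int × Int :=
  if numbers = [] then (0, 0)
  else
    numbers.foldl
      (fun (acc : Int × Int) num =>
        if num > 0 ∧ PySem.Int.mod num 2 = 0 then (acc.1 + 1, acc.2 + num) else acc)
      (0, 0)

-- ===== PORT B =====
-- divide and conquer on the index range [lo, hi); numbers[lo] is read only with
-- 0 ≤ lo < len, so getD lo 0 is exact there
def casSolve (numbers : List Int) (lo hi : Nat) : Int × Int :=
  if _ : hi - lo = 0 then (0, 0)
  else if _ : hi - lo = 1 then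
    let n := numbers.getD lo 0
    if n > 0 ∧ PySem.Int.mod n 2 = 0 then (1, n) else (0, 0)
  else
    let mid := (lo + hi) / 2
    let p1 := casSolve numbers lo mid
    let p2 := casSolve numbers mid hi
    (p1.1 + p2.1, p1.2 + p2.2)
termination_by hi - lo
decreasing_by all_goals omega

def count_and_sum_alt (numbers : List Int) : Int × Int :=
  casSolve numbers 0 numbers.length

-- ===== PRECONDITION & SPEC =====
def Spec_count_and_sum (numbers : List Int) (out : Int × Int) : Prop := out = count_and_sum_alt numbers
instance (numbers : List Int) (out : Int × Int) : Decidable (Spec_count_and_sum numbers out) := by unfold Spec_count_and_sum; infer_instance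

-- ===== CLAIM (what is proved, stated in full; the proofs are below) =====
def Claim_equal_count_and_sum : Prop := ∀ (numbers : List Int), Dom_count_and_sum numbers → Spec_count_and_sum numbers (count_and_sum numbers)

-- ===== LEMMAS AND PROOFS =====
def casPred (n : Int) : Bool := decide (n > 0 ∧ PySem.Int.mod n 2 = 0)

def casAgg (l : List Int) : Int × Int :=
  (((l.filter casPred).length : Int), (l.filter casPred).sum)

theorem casAgg_append (l1 l2 : List Int) :
    casAgg (l1 ++ l2) = ((casAgg l1).1 + (casAgg l2).1, (casAgg l1).2 + (casAgg l2).2) := by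
  simp only [casAgg, List.filter_append, List.length_append, List.sum_append]
  push_cast; ring_nf

theorem casSolve_eq_agg (numbers : List Int) :
    ∀ (k lo hi : Nat), hi - lo ≤ k → hi ≤ numbers.length →
    casSolve numbers lo hi = casAgg ((numbers.drop lo).take (hi - lo)) := by
  intro k
  induction k with
  | zero =>
    intro lo hi hk _
    have h0 : hi - lo = 0 := by omega
    rw [casSolve]
    simp [h0, casAgg]
  | succ k ih =>
    intro lo hi hk hhi
    rw [casSolve]
    by_cases h0 : hi - lo = 0
    · simp [h0, casAgg]
    · by_cases h1 : hi - lo = 1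
      · rw [dif_neg h0, dif_pos h1, h1]
        have hlo : lo < numbers.length := by omega
        have hdrop : numbers.drop lo = numbers[lo] :: numbers.drop (lo + 1) :=
          List.drop_eq_getElem_cons hlo
        have hgetD : numbers.getD lo 0 = numbers[lo] := by
          simp [List.getD_eq_getElem?_getD, List.getElem?_eq_getElem hlo]
        rw [hdrop]
        simp only [List.take_succ_cons, List.take_zero, hgetD]
        by_cases hp : numbers[lo] > 0 ∧ PySem.Int.mod (numbers[lo]) 2 = 0
        · have hb : casPred numbers[lo] = true := decide_eq_true hp
          simp only [if_pos hp, casAgg, List.filter_cons, hb, if_true, List.filter_nil]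
          simp
        · have hb : casPred numbers[lo] = false := decide_eq_false hp
          simp only [if_neg hp, casAgg, List.filter_cons, hb, Bool.false_eq_true, if_false,
            List.filter_nil]
          simp
      · rw [dif_neg h0, dif_neg h1]
        show ((casSolve numbers lo ((lo + hi) / 2)).1 + (casSolve numbers ((lo + hi) / 2) hi).1,
              (casSolve numbers lo ((lo + hi) / 2)).2 + (casSolve numbers ((lo + hi) / 2) hi).2)
            = casAgg ((numbers.drop lo).take (hi - lo))
        rw [ih lo ((lo + hi) / 2) (by omega) (by omega), ih ((lo + hi) / 2) hi (by omega) hhi]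
        have hseg : (numbers.drop lo).take (hi - lo)
            = (numbers.drop lo).take ((lo + hi) / 2 - lo)
              ++ (numbers.drop ((lo + hi) / 2)).take (hi - (lo + hi) / 2) := by
          have hdd : numbers.drop ((lo + hi) / 2)
              = (numbers.drop lo).drop ((lo + hi) / 2 - lo) := by
            rw [List.drop_drop]; congr 1; omega
          rw [hdd, ← List.take_add]
          congr 1; omega
        rw [hseg, casAgg_append]

theorem cas_fold_general (numbers : List Int) (c s : Int) :
    numbers.foldl
      (fun (acc : Int × Int) num =>
        if num > 0 ∧ PySem.Int.mod num 2 = 0 then (acc.1 + 1, acc.2 + num) else acc)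
      (c, s)
    = (c + (casAgg numbers).1, s + (casAgg numbers).2) := by
  induction numbers generalizing c s with
  | nil => simp [casAgg]
  | cons x xs ih =>
    simp only [List.foldl_cons]
    by_cases h : x > 0 ∧ PySem.Int.mod x 2 = 0
    · have hb : casPred x = true := decide_eq_true h
      rw [if_pos h, ih]
      simp only [casAgg, List.filter_cons, hb, if_true, List.length_cons, List.sum_cons]
      refine Prod.ext ?_ ?_ <;> (dsimp only; push_cast; ring)
    · have hb : casPred x = false := decide_eq_false h
      rw [if_neg h, ih]
      simp only [casAgg, List.filter_cons, hb, Bool.false_eq_true, if_false]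

-- ===== VERDICT (by name: the statement is the Claim_ definition above) =====
theorem count_and_sum_spec : Claim_equal_count_and_sum := by
  intro numbers _
  unfold Spec_count_and_sum count_and_sum count_and_sum_alt
  rw [casSolve_eq_agg numbers numbers.length 0 numbers.length (by omega) le_rfl]
  simp only [List.drop_zero, Nat.sub_zero, List.take_length]
  by_cases h : numbers = []
  · simp [h, casAgg]
  · rw [if_neg h, cas_fold_general]
    simp
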